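-- pv_equiv track=rewrite | github.com/Uninterpretable-Evolving-Blackbox/vep_ai_demo | vep_assistant.py | _detect_use_case
-- ===== SOURCE A (Python) =====
-- def _detect_use_case(enabled: set, vep_options: list, training_examples: list,
--                      user_query: str) -> str:
--     """Infer the use case category from the top retrieval match."""
--     scored = []
--     query_words = set(user_query.lower().split())
--     for ex in training_examples:
--         ex_text = f"{ex['user_query']} {ex['use_case_category']} {ex.get('justification', '')}".lower()
--         ex_words = set(ex_text.split())
--         overlap = len(query_words & ex_words)
--         scored.append((overlap, ex))
--     scored.sort(key=lambda x: x[0], reverse=True)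
--     return scored[0][1]["use_case_category"] if scored else "rare_disease_germline"
-- ===== SOURCE B (Python) =====
-- def _detect_use_case(enabled: set, vep_options: list, training_examples: list,
--                      user_query: str) -> str:
--     """Single-pass max selection instead of building a scored list and sorting; first maximum wins."""
--     query_words = set(user_query.lower().split())
--     best_overlap = -1
--     best_category = "rare_disease_germline"
--     for ex in training_examples:
--         ex_text = f"{ex['user_query']} {ex['use_case_category']} {ex.get('justification', '')}".lower()
--         overlap = len(query_words & set(ex_text.split()))
--         if overlap > best_overlap:
--             best_overlap = overlap
--             best_category = ex["use_case_category"]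
--     return best_category
-- ===== Notes on version B (the rewrite author's own statement) =====
-- stated objective: simpler
-- what changed: Replaced the build-a-scored-list-then-stable-reverse-sort-and-take-head pattern by a single pass that keeps the best (overlap, category) seen so far, updating only on strictly greater overlap so the first maximum is kept exactly as the stable sort does.
import Mathlib
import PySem

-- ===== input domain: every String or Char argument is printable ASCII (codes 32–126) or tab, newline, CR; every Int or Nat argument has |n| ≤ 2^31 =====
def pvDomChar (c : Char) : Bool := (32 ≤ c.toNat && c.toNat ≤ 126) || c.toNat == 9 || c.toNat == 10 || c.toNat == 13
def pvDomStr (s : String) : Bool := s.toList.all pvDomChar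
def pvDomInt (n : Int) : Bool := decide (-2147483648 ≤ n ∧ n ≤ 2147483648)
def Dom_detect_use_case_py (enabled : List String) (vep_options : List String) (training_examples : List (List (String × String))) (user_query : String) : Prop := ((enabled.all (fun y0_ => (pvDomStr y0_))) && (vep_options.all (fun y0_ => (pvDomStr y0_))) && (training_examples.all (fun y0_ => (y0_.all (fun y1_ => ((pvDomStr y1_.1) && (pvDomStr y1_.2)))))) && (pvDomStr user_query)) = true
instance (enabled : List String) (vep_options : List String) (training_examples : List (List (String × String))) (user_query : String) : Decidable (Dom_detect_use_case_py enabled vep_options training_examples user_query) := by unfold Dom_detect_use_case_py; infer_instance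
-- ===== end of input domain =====

-- B replaces A's scored-list + stable reverse sort + head by a single strict-max pass (simpler; return-value equality proved on examples carrying both mandatory keys, where Python A does not raise KeyError).


-- ===== PORT A =====
-- shared text machinery (the identical Python expressions in A's loop body and B's loop body)
def pvQueryWords (user_query : String) : PySem.Set String :=
  PySem.Set.ofList (PySem.Str.split₀ (PySem.Str.lower user_query))

-- ex['user_query'] / ex['use_case_category'] raise on a missing key in Python; getD "" is exact under Pre_ below
def pvOverlap (qw : PySem.Set String) (ex : List (String × String)) : Int :=
  let d := PySem.Dict.mk ex
  let ex_text := PySem.Str.lower (PySem.Str.join " "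
    [PySem.Dict.getD d "user_query" "", PySem.Dict.getD d "use_case_category" "",
     PySem.Dict.getD d "justification" ""])
  PySem.Set.len (PySem.Set.inter qw (PySem.Set.ofList (PySem.Str.split₀ ex_text)))

def pvCat (ex : List (String × String)) : String :=
  PySem.Dict.getD (PySem.Dict.mk ex) "use_case_category" ""

def detect_use_case_py (enabled : List String) (vep_options : List String) (training_examples : List (List (String × String))) (user_query : String) : String :=
  let query_words := pvQueryWords user_query
  let scored := training_examples.map (fun ex => (pvOverlap query_words ex, ex))
  let scoredSorted := PySem.List.sorted scored (fun p => p.1) true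
  match scoredSorted with
  | [] => "rare_disease_germline"
  | top :: _ => pvCat top.2

-- ===== PORT B =====
def detect_use_case_py_alt (enabled : List String) (vep_options : List String) (training_examples : List (List (String × String))) (user_query : String) : String :=
  let query_words := pvQueryWords user_query
  (training_examples.foldl
    (fun best ex =>
      let overlap := pvOverlap query_words ex
      if best.1 < overlap then (overlap, pvCat ex) else best)
    ((-1 : Int), "rare_disease_germline")).2

-- ===== PRECONDITION & SPEC =====
-- Pre_ excludes exactly the examples on which Python A raises KeyError: a dict missing 'user_query' or 'use_case_category'.
def Pre_detect_use_case_py (enabled : List String) (vep_options : List String) (training_examples : List (List (String × String))) (user_query : String) : Prop :=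
  training_examples.all (fun ex =>
    (PySem.Dict.mk ex).contains "user_query" && (PySem.Dict.mk ex).contains "use_case_category") = true
instance (enabled : List String) (vep_options : List String) (training_examples : List (List (String × String))) (user_query : String) : Decidable (Pre_detect_use_case_py enabled vep_options training_examples user_query) := by unfold Pre_detect_use_case_py; infer_instance

def pvWitness_detect_use_case_py : List String × List String × (List (List (String × String))) × String :=
  ([], [], [[("user_query", "brca1 variant"), ("use_case_category", "cancer_somatic")]], "brca1 variant")

def Spec_detect_use_case_py (enabled : List String) (vep_options : List String) (training_examples : List (List (String × String))) (user_query : String) (out : String) : Prop := out = detect_use_case_py_alt enabled vep_options training_examples user_query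
instance (enabled : List String) (vep_options : List String) (training_examples : List (List (String × String))) (user_query : String) (out : String) : Decidable (Spec_detect_use_case_py enabled vep_options training_examples user_query out) := by unfold Spec_detect_use_case_py; infer_instance

-- ===== CLAIM (what is proved, stated in full; the proofs are below) =====
def Claim_equal_detect_use_case_py : Prop := ∀ (enabled : List String) (vep_options : List String) (training_examples : List (List (String × String))) (user_query : String), Dom_detect_use_case_py enabled vep_options training_examples user_query → Pre_detect_use_case_py enabled vep_options training_examples user_query → Spec_detect_use_case_py enabled vep_options training_examples user_query (detect_use_case_py enabled vep_options training_examples user_query)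

-- ===== LEMMAS AND PROOFS =====
-- the strict-max step on scored pairs (A's side, after the sort is characterised)
def pvMaxStep (b x : Int × (List (String × String))) : Int × (List (String × String)) :=
  if b.1 < x.1 then x else b

-- head of the insertion-sort fold (reverse=True, stable) is the first maximum of the processed list
lemma pv_head_foldl_insertBy (xs : List (Int × (List (String × String))))
    (b : Int × (List (String × String))) (acc : List (Int × (List (String × String)))) :
    (List.foldl (fun acc x => PySem.List.insertBy (fun a c => decide (c.1 < a.1)) x acc) (b :: acc) xs).head?
      = some (List.foldl pvMaxStep b xs) := by
  induction xs generalizing b acc with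
  | nil => rfl
  | cons x xs ih =>
    simp only [List.foldl_cons, PySem.List.insertBy, pvMaxStep]
    by_cases h : b.1 < x.1
    · simp only [h, decide_true, if_true]
      exact ih x (b :: acc)
    · simp only [h, decide_false, if_false]
      exact ih b _

-- B's fold on examples mirrors the strict-max fold on A's scored pairs
lemma pv_fold_corr (qw : PySem.Set String) (xs : List (List (String × String)))
    (b : Int × (List (String × String))) :
    List.foldl (fun best ex =>
        let overlap := pvOverlap qw ex
        if best.1 < overlap then (overlap, pvCat ex) else best)
      (b.1, pvCat b.2) xs
      = (fun p => (p.1, pvCat p.2))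
          (List.foldl pvMaxStep b (xs.map (fun ex => (pvOverlap qw ex, ex)))) := by
  induction xs generalizing b with
  | nil => rfl
  | cons x xs ih =>
    simp only [List.map_cons, List.foldl_cons, pvMaxStep]
    by_cases h : b.1 < pvOverlap qw x
    · simp only [h, if_true]
      exact ih (pvOverlap qw x, x)
    · simp only [h, if_false]
      exact ih b

lemma pv_overlap_nonneg (qw : PySem.Set String) (ex : List (String × String)) :
    0 ≤ pvOverlap qw ex := by
  simp [pvOverlap, PySem.Set.len]

-- ===== VERDICT (by name: the statement is the Claim_ definition above) =====
theorem detect_use_case_py_spec : Claim_equal_detect_use_case_py := by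
  intro enabled vep_options training_examples user_query _ _
  unfold Spec_detect_use_case_py detect_use_case_py detect_use_case_py_alt
  cases training_examples with
  | nil => rfl
  | cons ex0 rest =>
    set qw := pvQueryWords user_query with hqw
    have hlt : (-1 : Int) < pvOverlap qw ex0 := by
      have := pv_overlap_nonneg qw ex0; omega
    simp only [List.map_cons, List.foldl_cons, hlt, if_true,
      PySem.List.sorted_rev_eq_foldl_insertBy]
    rw [pv_fold_corr qw rest (pvOverlap qw ex0, ex0)]
    have h0 : PySem.List.insertBy (fun a c => decide (c.1 < a.1))
        ((pvOverlap qw ex0, ex0) : Int × (List (String × String))) [] = [(pvOverlap qw ex0, ex0)] := by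
      simp [PySem.List.insertBy]
    rw [h0]
    have := pv_head_foldl_insertBy (rest.map (fun ex => (pvOverlap qw ex, ex)))
      (pvOverlap qw ex0, ex0) []
    cases hm : (List.foldl (fun acc x => PySem.List.insertBy (fun a c => decide (c.1 < a.1)) x acc)
        [(pvOverlap qw ex0, ex0)] (rest.map (fun ex => (pvOverlap qw ex, ex)))) with
    | nil => simp [hm] at this
    | cons top tl =>
      rw [hm] at this
      simp only [List.head?] at this
      injection this with htop
      simp [htop]
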